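-- pv_equiv track=rewrite | github.com/pypi-data/pypi-mirror-382 | packages/lammps-ast/lammps_ast-0.1.6.tar.gz/lammps_ast-0.1.6/lammps_ast/sanitizer.py | merge_ampersand_lines
-- ===== SOURCE A (Python) =====
-- def merge_ampersand_lines(script):
--     """Merges lines ending with '&' into a single line while preserving spacing."""
--     merged_lines, buffer = [], None
--
--     for line in script.splitlines():
--         stripped = line.rstrip()
--         if stripped.endswith('&'):
--             buffer = (buffer or "") + " " + stripped[:-1].strip()
--         else:
--             merged_lines.append((buffer + " " + stripped).strip() if buffer else stripped)
--             buffer = None  # Reset buffer after appending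
--
--     if buffer:
--         merged_lines.append(buffer.strip())
--
--     return '\n'.join(merged_lines)
-- ===== SOURCE B (Python) =====
-- def merge_ampersand_lines(script):
--     """Merges lines ending with '&' into a single line while preserving spacing."""
--     # Phase 1: group lines into maximal runs ending at the first non-'&' line (or EOF).
--     groups, cur = [], []
--     for line in script.splitlines():
--         cur.append(line)
--         if not line.rstrip().endswith('&'):
--             groups.append(cur)
--             cur = []
--     if cur:
--         groups.append(cur)
--     # Phase 2: render each group to one output line.
--     out = []
--     for g in groups:
--         if len(g) == 1 and not g[0].rstrip().endswith('&'):
--             out.append(g[0].rstrip())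
--         else:
--             pieces = []
--             for ln in g:
--                 s = ln.rstrip()
--                 pieces.append(s[:-1].strip() if s.endswith('&') else s)
--             out.append(' '.join(pieces).strip())
--     return '\n'.join(out)
-- ===== Notes on version B (the rewrite author's own statement) =====
-- stated objective: alternative
-- what changed: Replaces A's single loop with a mutable string buffer by an explicit two-phase decomposition: first group the lines into maximal continuation runs, then render each group independently (standalone lines rstrip-only, merged groups space-joined pieces fully stripped).
import Mathlib
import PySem

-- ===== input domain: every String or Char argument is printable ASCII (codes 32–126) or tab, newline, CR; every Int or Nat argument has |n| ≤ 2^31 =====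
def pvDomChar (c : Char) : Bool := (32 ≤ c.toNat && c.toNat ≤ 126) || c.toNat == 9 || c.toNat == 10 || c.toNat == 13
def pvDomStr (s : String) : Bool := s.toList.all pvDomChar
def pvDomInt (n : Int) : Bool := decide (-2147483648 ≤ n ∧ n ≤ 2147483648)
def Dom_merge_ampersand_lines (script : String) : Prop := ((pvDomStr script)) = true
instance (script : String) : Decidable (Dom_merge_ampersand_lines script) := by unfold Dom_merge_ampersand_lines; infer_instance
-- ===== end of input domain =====

-- B replaces A's single loop with buffer state by an explicit two-phase decomposition
-- (group lines into continuation runs, then render each group); objective: alternative, same cost.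

-- ===== PORT A =====
-- Python truthiness of the buffer (None or "" is falsy).
def pvTruthyA (b : Option (List Char)) : Bool :=
  match b with | none => false | some s => !s.isEmpty

-- one iteration of A's 'for line in script.splitlines()' loop, state = (merged_lines, buffer)
def pvStepA (st : List (List Char) × Option (List Char)) (line : List Char) :
    List (List Char) × Option (List Char) :=
  let stripped := PySem.Chars.rstrip line
  if PySem.Chars.endswith stripped ['&'] then
    (st.1, some ((st.2.getD []) ++ [' '] ++
      PySem.Chars.strip (PySem.Chars.slice stripped none (some (-1)))))
  else
    if pvTruthyA st.2 then
      (st.1 ++ [PySem.Chars.strip ((st.2.getD []) ++ [' '] ++ stripped)], none)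
    else
      (st.1 ++ [stripped], none)

def merge_ampersand_lines (script : String) : String :=
  let st := (PySem.Chars.splitlines script.toList).foldl pvStepA ([], none)
  let merged := if pvTruthyA st.2 then st.1 ++ [PySem.Chars.strip (st.2.getD [])] else st.1
  String.ofList (PySem.Chars.join ['\n'] merged)

-- ===== PORT B =====
-- phase 1: one iteration of the grouping loop, state = (groups, cur)
def pvStepB (st : List (List (List Char)) × List (List Char)) (line : List Char) :
    List (List (List Char)) × List (List Char) :=
  let cur := st.2 ++ [line]
  if !(PySem.Chars.endswith (PySem.Chars.rstrip line) ['&']) then (st.1 ++ [cur], [])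
  else (st.1, cur)

-- phase 2: render one group to one output line
def pvRenderB (g : List (List Char)) : List Char :=
  if g.length = 1 && !(PySem.Chars.endswith (PySem.Chars.rstrip (g.headD [])) ['&']) then
    PySem.Chars.rstrip (g.headD [])
  else
    let pieces := g.map (fun ln =>
      let s := PySem.Chars.rstrip ln
      if PySem.Chars.endswith s ['&'] then
        PySem.Chars.strip (PySem.Chars.slice s none (some (-1)))
      else s)
    PySem.Chars.strip (PySem.Chars.join [' '] pieces)

def merge_ampersand_lines_alt (script : String) : String :=
  let st := (PySem.Chars.splitlines script.toList).foldl pvStepB ([], [])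
  let groups := if st.2.isEmpty then st.1 else st.1 ++ [st.2]
  String.ofList (PySem.Chars.join ['\n'] (groups.map pvRenderB))

-- ===== PRECONDITION & SPEC =====
def Spec_merge_ampersand_lines (script : String) (out : String) : Prop := out = merge_ampersand_lines_alt script
instance (script : String) (out : String) : Decidable (Spec_merge_ampersand_lines script out) := by unfold Spec_merge_ampersand_lines; infer_instance

-- ===== CLAIM (what is proved, stated in full; the proofs are below) =====
def Claim_equal_merge_ampersand_lines : Prop := ∀ (script : String), Dom_merge_ampersand_lines script → Spec_merge_ampersand_lines script (merge_ampersand_lines script)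

-- ===== LEMMAS AND PROOFS =====

-- the continuation piece A accumulates for a line ending (after rstrip) in '&'
def pvPiece (ln : List Char) : List Char :=
  PySem.Chars.strip (PySem.Chars.slice (PySem.Chars.rstrip ln) none (some (-1)))

-- A's buffer reconstructed from B's open group
def pvBufOf (cur : List (List Char)) : Option (List Char) :=
  if cur.isEmpty then none
  else some (' ' :: PySem.Chars.join [' '] (cur.map pvPiece))

def pvInv (a : List (List Char) × Option (List Char))
    (b : List (List (List Char)) × List (List Char)) : Prop :=
  a.1 = b.1.map pvRenderB ∧ a.2 = pvBufOf b.2 ∧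
  ∀ ln ∈ b.2, PySem.Chars.endswith (PySem.Chars.rstrip ln) ['&'] = true

theorem pv_join_append_singleton (s y : List Char) (xs : List (List Char)) (h : xs ≠ []) :
    PySem.Chars.join s (xs ++ [y]) = PySem.Chars.join s xs ++ s ++ y := by
  induction xs with
  | nil => exact absurd rfl h
  | cons x t ih =>
    cases t with
    | nil => simp [PySem.Chars.join_singleton, PySem.Chars.join_cons_cons]
    | cons z t' =>
      have := ih (by simp)
      simp only [List.cons_append, PySem.Chars.join_cons_cons] at *
      simp [this]

theorem pv_strip_space_cons (x : List Char) :
    PySem.Chars.strip (' ' :: x) = PySem.Chars.strip x := by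
  simp [PySem.Chars.strip, PySem.Chars.lstrip, List.dropWhile]
  rfl

-- B's rendering of a group closed by a terminator line
theorem pv_render_closed (g : List (List Char)) (line : List Char)
    (hg : ∀ ln ∈ g, PySem.Chars.endswith (PySem.Chars.rstrip ln) ['&'] = true)
    (hne : g ≠ [])
    (hl : PySem.Chars.endswith (PySem.Chars.rstrip line) ['&'] = false) :
    pvRenderB (g ++ [line]) =
      PySem.Chars.strip (PySem.Chars.join [' '] (g.map pvPiece) ++ [' '] ++
        PySem.Chars.rstrip line) := by
  have hlen : g.length + 1 ≠ 1 := by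
    cases g with | nil => exact absurd rfl hne | cons _ _ => simp
  have hmap : (g ++ [line]).map (fun ln =>
      let s := PySem.Chars.rstrip ln
      if PySem.Chars.endswith s ['&'] then
        PySem.Chars.strip (PySem.Chars.slice s none (some (-1)))
      else s) = g.map pvPiece ++ [PySem.Chars.rstrip line] := by
    simp only [List.map_append, List.map_cons, List.map_nil]
    congr 1
    · exact List.map_congr_left (fun x hx => by simp [hg x hx, pvPiece])
    · simp [hl]
  cases g with
  | nil => exact absurd rfl hne
  | cons c t =>
    simp only [pvRenderB]
    rw [if_neg (by simp)]
    rw [hmap, pv_join_append_singleton _ _ _ (by simp)]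

-- B's rendering of the trailing open group (all lines continuations)
theorem pv_render_open (g : List (List Char))
    (hg : ∀ ln ∈ g, PySem.Chars.endswith (PySem.Chars.rstrip ln) ['&'] = true)
    (hne : g ≠ []) :
    pvRenderB g = PySem.Chars.strip (PySem.Chars.join [' '] (g.map pvPiece)) := by
  have hmap : g.map (fun ln =>
      let s := PySem.Chars.rstrip ln
      if PySem.Chars.endswith s ['&'] then
        PySem.Chars.strip (PySem.Chars.slice s none (some (-1)))
      else s) = g.map pvPiece :=
    List.map_congr_left (fun x hx => by simp [hg x hx, pvPiece])
  have hcond : ¬(g.length = 1 ∧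
      (!PySem.Chars.endswith (PySem.Chars.rstrip (g.headD [])) ['&']) = true) := by
    rintro ⟨h1, h2⟩
    cases g with
    | nil => exact absurd rfl hne
    | cons c t => simp [hg c (by simp)] at h2
  simp only [pvRenderB]
  rw [if_neg (by simpa using hcond), hmap]

theorem pv_step_pres (a : List (List Char) × Option (List Char))
    (b : List (List (List Char)) × List (List Char)) (line : List Char)
    (h : pvInv a b) : pvInv (pvStepA a line) (pvStepB b line) := by
  obtain ⟨h1, h2, h3⟩ := h
  by_cases hc : PySem.Chars.endswith (PySem.Chars.rstrip line) ['&'] = true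
  · -- continuation line: A extends its buffer, B extends the open group
    have eA : pvStepA a line = (a.1, some ((a.2.getD []) ++ [' '] ++ pvPiece line)) := by
      simp [pvStepA, hc, pvPiece]
    have eB : pvStepB b line = (b.1, b.2 ++ [line]) := by simp [pvStepB, hc]
    refine ⟨by rw [eA, eB]; exact h1, ?_, ?_⟩
    · rw [eA, eB]
      cases hcur : b.2 with
      | nil =>
        have ha2 : a.2 = none := by simpa [pvBufOf, hcur] using h2
        simp [ha2, pvBufOf, PySem.Chars.join_singleton]
      | cons c t =>
        have ha2 : a.2 = some (' ' :: PySem.Chars.join [' '] ((c :: t).map pvPiece)) := by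
          simpa [pvBufOf, hcur] using h2
        rw [ha2]
        simp only [pvBufOf, Option.getD_some]
        rw [if_neg (by simp)]
        simp only [List.map_append, List.map_cons, List.map_nil]
        rw [pv_join_append_singleton [' '] (pvPiece line) (pvPiece c :: List.map pvPiece t)
              (by simp)]
        simp
    · rw [eB]
      intro ln hln
      rcases List.mem_append.1 hln with h' | h'
      · exact h3 ln h'
      · simp at h'; subst h'; exact hc
  · -- terminator line: A flushes, B closes the group
    have hc' : PySem.Chars.endswith (PySem.Chars.rstrip line) ['&'] = false := by
      simpa using hc
    have eB : pvStepB b line = (b.1 ++ [b.2 ++ [line]], []) := by simp [pvStepB, hc']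
    cases hcur : b.2 with
    | nil =>
      have ha2 : a.2 = none := by simpa [pvBufOf, hcur] using h2
      have eA : pvStepA a line = (a.1 ++ [PySem.Chars.rstrip line], none) := by
        simp [pvStepA, hc', ha2, pvTruthyA]
      refine ⟨?_, by rw [eA, eB]; simp [pvBufOf], by rw [eB]; simp⟩
      rw [eA, eB, h1, hcur]
      simp [pvRenderB, hc']
    | cons c t =>
      have ha2 : a.2 = some (' ' :: PySem.Chars.join [' '] ((c :: t).map pvPiece)) := by
        simpa [pvBufOf, hcur] using h2
      have eA : pvStepA a line = (a.1 ++
          [PySem.Chars.strip ((' ' :: PySem.Chars.join [' '] ((c :: t).map pvPiece))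
            ++ [' '] ++ PySem.Chars.rstrip line)], none) := by
        simp [pvStepA, hc', ha2, pvTruthyA]
      refine ⟨?_, by rw [eA, eB]; simp [pvBufOf], by rw [eB]; simp⟩
      rw [eA, eB, h1, hcur]
      simp only [List.map_append, List.map_cons, List.map_nil]
      rw [pv_render_closed (c :: t) line (fun ln hln => h3 ln (hcur ▸ hln)) (by simp) hc']
      simp [pv_strip_space_cons, List.append_assoc]

theorem pv_fold_inv (ls : List (List Char)) (a : List (List Char) × Option (List Char))
    (b : List (List (List Char)) × List (List Char)) (h : pvInv a b) :
    pvInv (ls.foldl pvStepA a) (ls.foldl pvStepB b) := by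
  induction ls generalizing a b with
  | nil => exact h
  | cons l t ih => exact ih _ _ (pv_step_pres a b l h)

-- ===== VERDICT (by name: the statement is the Claim_ definition above) =====
theorem merge_ampersand_lines_spec : Claim_equal_merge_ampersand_lines := by
  intro script _
  unfold Spec_merge_ampersand_lines merge_ampersand_lines merge_ampersand_lines_alt
  have h := pv_fold_inv (PySem.Chars.splitlines script.toList) ([], none) ([], [])
    ⟨rfl, by simp [pvBufOf], by simp⟩
  set a := (PySem.Chars.splitlines script.toList).foldl pvStepA ([], none) with ha
  set b := (PySem.Chars.splitlines script.toList).foldl pvStepB ([], []) with hb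
  obtain ⟨h1, h2, h3⟩ := h
  cases hcur : b.2 with
  | nil =>
    have ha2 : a.2 = none := by simpa [pvBufOf, hcur] using h2
    simp [ha2, pvTruthyA, h1, hcur]
  | cons c t =>
    have ha2 : a.2 = some (' ' :: PySem.Chars.join [' '] ((c :: t).map pvPiece)) := by
      simpa [pvBufOf, hcur] using h2
    simp only [ha2, pvTruthyA, Option.getD_some, h1, hcur, List.isEmpty_cons,
      Bool.false_eq_true, if_neg (by simp : ¬False), List.map_append, List.map_cons,
      List.map_nil]
    rw [pv_strip_space_cons,
        pv_render_open (c :: t) (fun ln hln => h3 ln (hcur ▸ hln)) (by simp)]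
    simp
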